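-- pv_equiv track=rewrite | github.com/AnJeongMin/Algorithm-practice-python- | p1.py | solve
-- ===== SOURCE A (Python) =====
-- from collections import deque
--
-- def solve(arr, oils): # arr 300, 300 || max K 400 || D 20,000
--     res = 0
--
--     q = []
--     for row in arr:
--         for elem in row:
--             q.append(elem)
--     q.sort()
--
--     dq = deque()
--     for elem in q:
--         dq.append([elem, 0])
--
--     day = 1
--     for oil in oils: # 20,000
--         for _ in range(oil): # 400
--             cut, cutday = dq.pop()
--             dq.appendleft([1, day])
--             grow = day-cutday
--             res += (cut-1+grow)*day
--         day += 1
--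
--     return res
-- ===== SOURCE B (Python) =====
-- def solve(arr, oils):
--     # No deque simulation: the pops consume the sorted stock from the largest
--     # end, and after the stock is exhausted they consume the regrown [1, day]
--     # stumps in the order those were planted.  So precompute the day of every
--     # pop, then evaluate each pop's contribution by direct indexing.
--     q = sorted(e for row in arr for e in row)
--     n = len(q)
--     days = []
--     d = 1
--     for oil in oils:
--         days.extend([d] * max(oil, 0))
--         d += 1
--     res = 0
--     for k, dk in enumerate(days):
--         if k < n:
--             res += (q[n - 1 - k] - 1 + dk) * dk
--         else:
--             res += (dk - days[k - n]) * dk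
--     return res
-- ===== Notes on version B (the rewrite author's own statement) =====
-- stated objective: alternative
-- what changed: B replaces the mutable deque simulation (pop right / appendleft each pop) with a precomputed per-pop day list and a direct-index formula: pop k takes sorted[n-1-k] when k<n and a day-days[k-n] regrown stump otherwise, so no deque and no per-pop list allocation.
import Mathlib
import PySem

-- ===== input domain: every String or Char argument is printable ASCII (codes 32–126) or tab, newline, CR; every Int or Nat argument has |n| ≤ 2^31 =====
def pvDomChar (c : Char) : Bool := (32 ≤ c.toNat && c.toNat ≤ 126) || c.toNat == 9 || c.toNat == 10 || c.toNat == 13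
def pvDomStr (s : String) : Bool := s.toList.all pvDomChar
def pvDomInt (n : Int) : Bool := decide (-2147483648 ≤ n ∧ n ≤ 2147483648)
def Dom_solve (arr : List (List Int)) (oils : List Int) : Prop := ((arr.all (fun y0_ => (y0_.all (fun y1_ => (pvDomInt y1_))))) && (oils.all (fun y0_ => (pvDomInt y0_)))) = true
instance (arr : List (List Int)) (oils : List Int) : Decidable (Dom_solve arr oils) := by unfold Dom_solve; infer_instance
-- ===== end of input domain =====

-- B replaces A's deque simulation by a precomputed per-pop day list and a direct-index
-- formula per pop (objective: alternative; same asymptotic cost).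

-- ===== PORT A =====
-- one iteration of A's inner loop body (dq with deque-left at the list head; pop = last, appendleft = cons)
def solveStep (day : Int) (st : List (Int × Int) × Int) (_i : Int) : List (Int × Int) × Int :=
  match st.1.getLast? with
  | none => st                    -- pop from empty deque: Python raises IndexError; excluded by Pre_solve
  | some cd => ((1, day) :: st.1.dropLast, st.2 + (cd.1 - 1 + (day - cd.2)) * day)

def solve (arr : List (List Int)) (oils : List Int) : Int :=
  let q0 := arr.foldl (fun acc row => row.foldl (fun a e => a ++ [e]) acc) []
  let q := PySem.List.sorted q0 id false
  let dq := q.foldl (fun acc e => acc ++ [(e, (0 : Int))]) []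
  let fin := oils.foldl
    (fun (st : (List (Int × Int) × Int) × Int) oil =>
      ((PySem.List.pyRange 0 oil 1).foldl (solveStep st.2) st.1, st.2 + 1))
    ((dq, 0), 1)
  fin.1.2

-- ===== PORT B =====
def solve_alt (arr : List (List Int)) (oils : List Int) : Int :=
  let q := PySem.List.sorted (arr.flatMap (fun row => row)) id false
  let n : Int := q.length
  let days := (oils.foldl (fun (st : List Int × Int) oil =>
      (st.1 ++ List.replicate (max oil 0).toNat st.2, st.2 + 1)) ([], 1)).1
  (PySem.List.enumerate days 0).foldl (fun res kd =>
      if kd.1 < n then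
        res + ((PySem.List.pyGet? q (n - 1 - kd.1)).getD 0 - 1 + kd.2) * kd.2
      else
        res + (kd.2 - (PySem.List.pyGet? days (kd.1 - n)).getD 0) * kd.2) 0

-- ===== PRECONDITION & SPEC =====
-- Pre_ excludes exactly the inputs where A raises IndexError: an empty stock (arr flattens
-- to []) together with at least one positive oil, i.e. a pop from an empty deque.
def Pre_solve (arr : List (List Int)) (oils : List Int) : Prop :=
  arr.flatMap (fun row => row) ≠ [] ∨ ∀ oil ∈ oils, oil ≤ 0
instance (arr : List (List Int)) (oils : List Int) : Decidable (Pre_solve arr oils) := by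
  unfold Pre_solve; infer_instance
def pvWitness_solve : List (List Int) × List Int := ([[3, 1], [2]], [2, 1])

def Spec_solve (arr : List (List Int)) (oils : List Int) (out : Int) : Prop := out = solve_alt arr oils
instance (arr : List (List Int)) (oils : List Int) (out : Int) : Decidable (Spec_solve arr oils out) := by unfold Spec_solve; infer_instance

-- ===== CLAIM (what is proved, stated in full; the proofs are below) =====
def Claim_equal_solve : Prop := ∀ (arr : List (List Int)) (oils : List Int), Dom_solve arr oils → Pre_solve arr oils → Spec_solve arr oils (solve arr oils)

-- ===== LEMMAS AND PROOFS =====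

-- the day of every pop, in pop order
def dsAux : List Int → Int → List Int
  | [], _ => []
  | oil :: rest, d => List.replicate (max oil 0).toNat d ++ dsAux rest (d + 1)

-- B's per-pop contribution (k = pop index, dk = its day), over sorted stock q and full day list ds
def bterm (q ds : List Int) (k dk : Int) : Int :=
  if k < (q.length : Int) then
    ((PySem.List.pyGet? q ((q.length : Int) - 1 - k)).getD 0 - 1 + dk) * dk
  else
    (dk - (PySem.List.pyGet? ds (k - (q.length : Int))).getD 0) * dk

-- the deque contents after the pops of p (left of the deque = head of the list)
def dqOf (q p : List Int) : List (Int × Int) :=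
  ((p.map (fun d => ((1 : Int), d))).reverse.take q.length)
    ++ ((q.take (q.length - p.length)).map (fun e => (e, (0 : Int))))

theorem solveStep_of_getLast (day : Int) (dq : List (Int × Int)) (r : Int) (cd : Int × Int)
    (h : dq.getLast? = some cd) (i : Int) :
    solveStep day (dq, r) i
      = ((1, day) :: dq.dropLast, r + (cd.1 - 1 + (day - cd.2)) * day) := by
  simp [solveStep, h]

theorem foldl_ignore {α β : Type} (f : β → β) (i : β) (l : List α) :
    l.foldl (fun s _ => f s) i = f^[l.length] i := by
  induction l generalizing i with
  | nil => rfl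
  | cons a t ih => simp [List.foldl_cons, ih, Function.iterate_succ_apply]

-- one pop from the state dqOf q p, with ds = p ++ d :: tl (so the pop's day list extends p by d)
theorem step_lemma (q p : List Int) (d : Int) (tl : List Int) (R : Int) :
    solveStep d (dqOf q p, R) 0
      = (dqOf q (p ++ [d]), R + bterm q (p ++ d :: tl) (p.length : Int) d) := by
  by_cases hn : q.length = 0
  · have hq : q = [] := List.eq_nil_of_length_eq_zero hn
    subst hq
    simp [dqOf, solveStep, bterm]
  · by_cases ht : p.length < q.length
    · -- original stock remains: pop (q[n-t-1], 0)
      have hX : (p.map (fun d => ((1 : Int), d))).reverse.take q.length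
          = (p.map (fun d => ((1 : Int), d))).reverse := by
        apply List.take_of_length_le; simp; omega
      have hYlast : ((q.take (q.length - p.length)).map
          (fun e => (e, (0 : Int)))).getLast? = some (q[q.length - p.length - 1]'(by omega), 0) := by
        rw [List.getLast?_eq_getElem?]
        simp only [List.getElem?_map, List.length_map, List.length_take]
        rw [show min (q.length - p.length) q.length = q.length - p.length by omega]
        rw [List.getElem?_take_of_lt (by omega), List.getElem?_eq_getElem (by omega)]
        rfl
      have hlast : (dqOf q p).getLast? = some (q[q.length - p.length - 1]'(by omega), 0) := by
        rw [dqOf, List.getLast?_append, hYlast]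
        rfl
      rw [solveStep_of_getLast _ _ _ _ hlast]
      have hdrop : (dqOf q p).dropLast
          = (p.map (fun d => ((1 : Int), d))).reverse.take q.length
            ++ (q.take (q.length - p.length - 1)).map (fun e => (e, (0 : Int))) := by
        rw [dqOf, List.dropLast_append_of_ne_nil (by apply List.ne_nil_of_length_pos; simp; omega)]
        congr 1
        rw [← List.map_dropLast]
        congr 1
        rw [List.dropLast_eq_take, List.length_take, List.take_take]
        congr 1
        omega
      have hnew : dqOf q (p ++ [d])
          = ((1 : Int), d) :: (dqOf q p).dropLast := by
        rw [hdrop, dqOf, hX]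
        rw [show (q.length - (p ++ [d]).length) = q.length - p.length - 1 by simp; omega]
        simp only [List.map_append, List.map_cons, List.map_nil, List.reverse_append,
          List.reverse_cons, List.reverse_nil, List.nil_append, List.singleton_append]
        rw [List.take_of_length_le (by simp; omega)]
        rfl
      have hbt : bterm q (p ++ d :: tl) (p.length : Int) d
          = (q[q.length - p.length - 1]'(by omega) - 1 + (d - 0)) * d := by
        rw [bterm, if_pos (by exact_mod_cast ht)]
        rw [show ((q.length : Int) - 1 - (p.length : Int))
              = ((q.length - p.length - 1 : Nat) : Int) by omega]
        rw [PySem.List.pyGet?_natCast, List.getElem?_eq_getElem (by omega)]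
        simp
      rw [hbt, hnew]
    · -- stock exhausted: pop the regrown stump (1, p[t-n])
      have hn1 : 1 ≤ q.length := by omega
      have htn : q.length ≤ p.length := by omega
      have hY : q.take (q.length - p.length) = [] := by
        rw [show q.length - p.length = 0 by omega]; rfl
      have hdq : dqOf q p = (p.map (fun d => ((1 : Int), d))).reverse.take q.length := by
        rw [dqOf, hY]; simp
      have hlen : ((p.map (fun d => ((1 : Int), d))).reverse.take q.length).length
          = q.length := by simp; omega
      have hlast : (dqOf q p).getLast? = some (1, p[p.length - q.length]'(by omega)) := by
        rw [hdq, List.getLast?_eq_getElem?, hlen]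
        rw [List.getElem?_take_of_lt (by omega)]
        rw [List.getElem?_reverse (by simp; omega)]
        simp only [List.length_map]
        rw [show p.length - 1 - (q.length - 1) = p.length - q.length by omega]
        rw [List.getElem?_eq_getElem (by simp; omega), List.getElem_map]
      rw [solveStep_of_getLast _ _ _ _ hlast]
      have hdrop : (dqOf q p).dropLast
          = (p.map (fun d => ((1 : Int), d))).reverse.take (q.length - 1) := by
        rw [hdq, List.dropLast_eq_take, hlen, List.take_take]
        congr 1
        omega
      have hnew : dqOf q (p ++ [d])
          = ((1 : Int), d) :: (dqOf q p).dropLast := by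
        rw [hdrop, dqOf]
        rw [show q.take (q.length - (p ++ [d]).length) = [] from by
          rw [show q.length - (p ++ [d]).length = 0 by simp; omega]; rfl]
        simp only [List.map_append, List.map_cons, List.map_nil, List.reverse_append,
          List.reverse_cons, List.reverse_nil, List.nil_append, List.singleton_append,
          List.append_nil]
        rw [show q.length = (q.length - 1) + 1 from by omega, List.take_succ_cons]
        simp
      have hbt : bterm q (p ++ d :: tl) (p.length : Int) d
          = (1 - 1 + (d - p[p.length - q.length]'(by omega))) * d := by
        rw [bterm, if_neg (by omega)]
        rw [show ((p.length : Int) - (q.length : Int)) = ((p.length - q.length : Nat) : Int) by omega]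
        rw [PySem.List.pyGet?_natCast]
        rw [List.getElem?_append_left (by omega), List.getElem?_eq_getElem (by omega)]
        simp only [Option.getD_some]
        ring
      rw [hbt, hnew]

-- main invariant: simulating the pops of a prefix p of ds lands at dqOf q p and B's partial sum
theorem inv_lemma (q ds : List Int) (r0 : Int) :
    ∀ p, p <+: ds →
    p.foldl (fun st d => solveStep d st 0) (q.map (fun e => (e, (0 : Int))), r0)
      = (dqOf q p,
         r0 + ((PySem.List.enumerate p 0).map (fun kd => bterm q ds kd.1 kd.2)).sum) := by
  intro p
  induction p using List.reverseRecOn with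
  | nil =>
    intro _
    simp [dqOf, PySem.List.enumerate_nil]
  | append_singleton p d ih =>
    intro hp
    obtain ⟨tl, htl⟩ := hp
    have hds : ds = p ++ d :: tl := by rw [← htl]; simp
    have hp' : p <+: ds := ⟨d :: tl, hds.symm⟩
    rw [List.foldl_append, ih hp', List.foldl_cons, List.foldl_nil]
    subst hds
    rw [step_lemma]
    rw [PySem.List.enumerate_append]
    simp only [PySem.List.enumerate_cons, PySem.List.enumerate_nil, List.map_append,
      List.map_cons, List.map_nil, List.sum_append, List.sum_cons, List.sum_nil, zero_add,
      add_zero]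
    simp only [Prod.mk.injEq]
    exact ⟨by trivial, by ring⟩

theorem foldl_replicate {α β : Type} (g : β → α → β) (m : Nat) (d : α) (i : β) :
    (List.replicate m d).foldl g i = (fun s => g s d)^[m] i := by
  induction m generalizing i with
  | zero => rfl
  | succ k ih => simp [List.replicate_succ, List.foldl_cons, ih, Function.iterate_succ_apply]

-- A's nested loop = pop-by-pop fold over dsAux oils day
theorem a_loop (oils : List Int) (dq : List (Int × Int)) (r day : Int) :
    oils.foldl
      (fun (st : (List (Int × Int) × Int) × Int) oil =>
        ((PySem.List.pyRange 0 oil 1).foldl (solveStep st.2) st.1, st.2 + 1))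
      ((dq, r), day)
      = (((dsAux oils day).foldl (fun st d => solveStep d st 0) (dq, r)), day + oils.length) := by
  induction oils generalizing dq r day with
  | nil => simp [dsAux]
  | cons o t ih =>
    have h1 : (PySem.List.pyRange 0 o 1).foldl (solveStep day) (dq, r)
        = (List.replicate (max o 0).toNat day).foldl (fun st d => solveStep d st 0) (dq, r) := by
      rw [show (solveStep day)
            = (fun (s : List (Int × Int) × Int) (_ : Int) => solveStep day s 0) from rfl,
          foldl_ignore, foldl_replicate, PySem.List.length_pyRange_one]
      congr 1
      omega
    have h2 := ih (((List.replicate (max o 0).toNat day).foldl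
        (fun st d => solveStep d st 0) (dq, r)).1)
      (((List.replicate (max o 0).toNat day).foldl
        (fun st d => solveStep d st 0) (dq, r)).2) (day + 1)
    simp only [List.foldl_cons, h1] at *
    rw [h2]
    simp [dsAux, List.foldl_append]
    ring

-- B's day-list builder = dsAux
theorem b_days (oils : List Int) (acc : List Int) (d : Int) :
    (oils.foldl (fun (st : List Int × Int) oil =>
      (st.1 ++ List.replicate (max oil 0).toNat st.2, st.2 + 1)) (acc, d)).1
      = acc ++ dsAux oils d := by
  induction oils generalizing acc d with
  | nil => simp [dsAux]
  | cons o t ih => simp [List.foldl_cons, dsAux, ih, List.append_assoc]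

theorem foldl_append_singleton {α : Type} (r : List α) (init : List α) :
    r.foldl (fun a e => a ++ [e]) init = init ++ r := by
  induction r generalizing init with
  | nil => simp
  | cons x t ih => simp [List.foldl_cons, ih]

theorem flatten_eq (arr : List (List Int)) (init : List Int) :
    arr.foldl (fun acc row => row.foldl (fun a e => a ++ [e]) acc) init
      = init ++ arr.flatMap (fun row => row) := by
  induction arr generalizing init with
  | nil => simp
  | cons r t ih =>
    rw [List.foldl_cons, foldl_append_singleton, ih]
    simp

theorem dq_build (q : List Int) (init : List (Int × Int)) :
    q.foldl (fun acc e => acc ++ [(e, (0 : Int))]) init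
      = init ++ q.map (fun e => (e, (0 : Int))) := by
  induction q generalizing init with
  | nil => simp
  | cons x t ih => simp [List.foldl_cons, ih]

theorem foldl_add_sum {α : Type} (g : α → Int) (l : List α) (r0 : Int) :
    l.foldl (fun r x => r + g x) r0 = r0 + (l.map g).sum := by
  induction l generalizing r0 with
  | nil => simp
  | cons x t ih => simp [List.foldl_cons, ih]; ring

-- ===== VERDICT (by name: the statement is the Claim_ definition above) =====
theorem solve_spec : Claim_equal_solve := by
  intro arr oils _ _
  unfold Spec_solve
  simp only [solve, solve_alt, flatten_eq, List.nil_append]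
  rw [dq_build, List.nil_append, a_loop, inv_lemma _ (dsAux oils 1) 0 (dsAux oils 1)
    (List.prefix_refl _), b_days, List.nil_append]
  have hfun : (fun (res : Int) (kd : Int × Int) =>
      if kd.1 < ((PySem.List.sorted (arr.flatMap fun row => row) id false).length : Int) then
        res + ((PySem.List.pyGet? (PySem.List.sorted (arr.flatMap fun row => row) id false)
          (((PySem.List.sorted (arr.flatMap fun row => row) id false).length : Int) - 1 - kd.1)).getD 0
            - 1 + kd.2) * kd.2
      else
        res + (kd.2 - (PySem.List.pyGet? (dsAux oils 1)
          (kd.1 - ((PySem.List.sorted (arr.flatMap fun row => row) id false).length : Int))).getD 0) * kd.2)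
      = (fun (res : Int) (kd : Int × Int) =>
          res + bterm (PySem.List.sorted (arr.flatMap fun row => row) id false) (dsAux oils 1) kd.1 kd.2) := by
    funext res kd
    unfold bterm
    split <;> rfl
  rw [hfun, foldl_add_sum]
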